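-- pv_equiv track=rewrite | github.com/LMaxRouterCN/LLMwc4n | .github/scripts/combine.py | _check_tag_discontinuity
-- ===== SOURCE A (Python) =====
-- from typing import List, Dict, Set, Tuple
--
-- def _check_tag_discontinuity(tag_info: Dict[str, List[int]]) -> str:
--     """检查标签不连续性"""
--     warnings = []
--     for tag, groups in tag_info.items():
--         if len(groups) < 2:
--             continue
--
--         groups_set = set(groups)
--         min_group = min(groups_set)
--         max_group = max(groups_set)
--
--         expected_groups = set(range(min_group, max_group + 1))
--         missing = sorted(expected_groups - groups_set)
--
--         if missing:
--             warnings.append(f"标签 '{tag}' 在分组 {missing} 缺失")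
--
--     return "; ".join(warnings) if warnings else ""
-- ===== SOURCE B (Python) =====
-- def _check_tag_discontinuity(tag_info):
--     """检查标签不连续性 — sort unique groups once, scan adjacent pairs for gaps."""
--     warnings = []
--     for tag, groups in tag_info.items():
--         if len(groups) < 2:
--             continue
--         uniq = sorted(set(groups))
--         missing = []
--         for prev, cur in zip(uniq, uniq[1:]):
--             missing.extend(range(prev + 1, cur))
--         if missing:
--             warnings.append(f"标签 '{tag}' 在分组 {missing} 缺失")
--     return "; ".join(warnings) if warnings else ""
-- ===== Notes on version B (the rewrite author's own statement) =====
-- stated objective: alternative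
-- what changed: Instead of materialising set(range(min,max+1)), subtracting the group set and sorting the difference, B sorts the unique groups once and scans adjacent pairs, emitting each gap range already in order.
import Mathlib
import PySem

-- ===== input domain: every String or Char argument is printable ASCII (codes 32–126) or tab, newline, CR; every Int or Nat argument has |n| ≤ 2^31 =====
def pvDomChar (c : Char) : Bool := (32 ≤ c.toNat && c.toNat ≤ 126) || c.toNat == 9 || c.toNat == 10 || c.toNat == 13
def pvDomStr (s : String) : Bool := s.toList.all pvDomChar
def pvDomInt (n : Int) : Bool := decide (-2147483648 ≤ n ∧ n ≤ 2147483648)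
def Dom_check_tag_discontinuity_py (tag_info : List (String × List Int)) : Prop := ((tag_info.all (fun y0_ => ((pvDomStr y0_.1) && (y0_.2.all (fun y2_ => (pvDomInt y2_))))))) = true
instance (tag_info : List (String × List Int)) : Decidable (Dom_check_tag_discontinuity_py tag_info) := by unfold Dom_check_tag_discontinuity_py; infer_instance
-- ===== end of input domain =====

-- B replaces A's "set(range(min,max+1)) minus set, then sort" by one sort of the unique
-- groups and a scan of adjacent pairs emitting each gap already in order (objective: alternative).

-- ===== PORT A =====
-- the f-string f"标签 '{tag}' 在分组 {missing} 缺失" (both Pythons contain it verbatim;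
-- {missing} renders as Python's list repr "[a, b, …]")
def pvFmtWarn (tag : String) (missing : List Int) : String :=
  "标签 '" ++ tag ++ "' 在分组 [" ++ PySem.Str.join ", " (missing.map PySem.Int.toStr) ++ "] 缺失"

-- loop body of A: one (tag, groups) item
def pvStepA (warnings : List String) (p : String × List Int) : List String :=
  if p.2.length < 2 then warnings
  else
    let groups_set := PySem.Set.ofList p.2
    -- min()/max() of the set; the `none` arms are unreachable (groups has ≥ 2 elements)
    match PySem.List.min? groups_set (fun x => x), PySem.List.max? groups_set (fun x => x) with
    | some min_group, some max_group =>
      let expected_groups := PySem.Set.ofList (PySem.List.pyRange min_group (max_group + 1))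
      let missing := PySem.List.sorted (PySem.Set.diff expected_groups groups_set) (fun x => x)
      if missing = [] then warnings else warnings ++ [pvFmtWarn p.1 missing]
    | _, _ => warnings

def check_tag_discontinuity_py (tag_info : List (String × List Int)) : String :=
  let warnings := tag_info.foldl pvStepA []
  if warnings = [] then "" else PySem.Str.join "; " warnings

-- ===== PORT B =====
-- loop body of B: sort the unique groups once, scan adjacent pairs for gaps
def pvStepB (warnings : List String) (p : String × List Int) : List String :=
  if p.2.length < 2 then warnings
  else
    let uniq := PySem.List.sorted (PySem.Set.ofList p.2) (fun x => x)
    let missing := (uniq.zip (PySem.List.slice uniq (some 1) none)).foldl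
      (fun m pc => m ++ PySem.List.pyRange (pc.1 + 1) pc.2) []
    if missing = [] then warnings else warnings ++ [pvFmtWarn p.1 missing]

def check_tag_discontinuity_py_alt (tag_info : List (String × List Int)) : String :=
  let warnings := tag_info.foldl pvStepB []
  if warnings = [] then "" else PySem.Str.join "; " warnings

-- ===== PRECONDITION & SPEC =====
def Spec_check_tag_discontinuity_py (tag_info : List (String × List Int)) (out : String) : Prop := out = check_tag_discontinuity_py_alt tag_info
instance (tag_info : List (String × List Int)) (out : String) : Decidable (Spec_check_tag_discontinuity_py tag_info out) := by unfold Spec_check_tag_discontinuity_py; infer_instance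

-- ===== CLAIM (what is proved, stated in full; the proofs are below) =====
def Claim_equal_check_tag_discontinuity_py : Prop := ∀ (tag_info : List (String × List Int)), Dom_check_tag_discontinuity_py tag_info → Spec_check_tag_discontinuity_py tag_info (check_tag_discontinuity_py tag_info)

-- ===== LEMMAS AND PROOFS =====

-- every member of a strictly increasing list is ≤ its last element
lemma pvLe_getLast : ∀ (l : List Int) (hne : l ≠ []), l.Pairwise (· < ·) →
    ∀ x ∈ l, x ≤ l.getLast hne := by
  intro l
  induction l with
  | nil => intro h; exact absurd rfl h
  | cons a t ih =>
    intro _ hp x hx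
    rcases t with _ | ⟨b, r⟩
    · simp at hx; simp [hx]
    · rw [List.getLast_cons (by simp)]
      rcases List.mem_cons.mp hx with rfl | hx
      · have hab : x < b := (List.pairwise_cons.mp hp).1 b (by simp)
        have := ih (by simp) (List.pairwise_cons.mp hp).2 b (by simp)
        omega
      · exact ih (by simp) (List.pairwise_cons.mp hp).2 x hx

-- the adjacent-pair gap scan over a strictly increasing list h :: t produces exactly the
-- elements of range(h, last+1) that are not in the list, in order
lemma pvGaps_eq_filter : ∀ (t : List Int) (h : Int), (h :: t).Pairwise (· < ·) →
    ((h :: t).zip t).flatMap (fun pc => PySem.List.pyRange (pc.1 + 1) pc.2)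
      = (PySem.List.pyRange h ((h :: t).getLast (by simp) + 1)).filter
          (fun y => !((h :: t).contains y)) := by
  intro t
  induction t with
  | nil =>
    intro h _
    simp [PySem.List.pyRange_one_singleton]
  | cons b r ih =>
    intro h hp
    have hhb : h < b := (List.pairwise_cons.mp hp).1 b (by simp)
    have hp' : (b :: r).Pairwise (· < ·) := (List.pairwise_cons.mp hp).2
    have hbl : b ≤ (b :: r).getLast (by simp) := pvLe_getLast _ (by simp) hp' b (by simp)
    have hlast : (h :: b :: r).getLast (by simp) = (b :: r).getLast (by simp) :=
      List.getLast_cons (by simp)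
    rw [List.zip_cons_cons, List.flatMap_cons, ih b hp', hlast,
      PySem.List.pyRange_one_append h b ((b :: r).getLast (by simp) + 1)
        (le_of_lt hhb) (by omega),
      List.filter_append]
    congr 1
    · -- filter over range(h, b) keeps exactly range(h+1, b)
      rw [PySem.List.pyRange_one_cons hhb, List.filter_cons_of_neg (by simp),
        List.filter_eq_self.mpr ?_]
      intro y hy
      have hy' := PySem.List.mem_pyRange_one.mp hy
      have hmem : y ∉ h :: b :: r := by
        simp only [List.mem_cons, not_or]
        refine ⟨by omega, by omega, fun hyr => ?_⟩
        have : b < y := (List.pairwise_cons.mp hp').1 y hyr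
        omega
      simp [List.contains_eq_mem, hmem]
    · -- on range(b, last+1) membership in h::b::r equals membership in b::r
      apply List.filter_congr
      intro y hy
      have hy' := PySem.List.mem_pyRange_one.mp hy
      simp only [List.contains_eq_mem, List.mem_cons]
      have : y ≠ h := by omega
      simp [this]

-- core per-tag fact: A's missing list equals B's
lemma pvMissing_eq (groups : List Int) (mn mx : Int)
    (hmn : PySem.List.min? (PySem.Set.ofList groups) (fun x => x) = some mn)
    (hmx : PySem.List.max? (PySem.Set.ofList groups) (fun x => x) = some mx) :
    PySem.List.sorted
        (PySem.Set.diff (PySem.Set.ofList (PySem.List.pyRange mn (mx + 1)))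
          (PySem.Set.ofList groups)) (fun x => x)
      = ((PySem.List.sorted (PySem.Set.ofList groups) (fun x => x)).zip
            ((PySem.List.sorted (PySem.Set.ofList groups) (fun x => x)).drop 1)).foldl
          (fun m pc => m ++ PySem.List.pyRange (pc.1 + 1) pc.2) [] := by
  set s := PySem.Set.ofList groups with hs
  set u := PySem.List.sorted s (fun x => x) with hu
  have hperm : u.Perm s := PySem.List.sorted_perm s (fun x => x) false
  have hlt : u.Pairwise (· < ·) := PySem.List.sorted_ofList_pairwise_lt groups
  have hune : u ≠ [] := by
    intro h0
    have h1 : s = [] := (PySem.List.sorted_eq_nil_iff s (fun x => x) false).mp h0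
    rw [h1, (PySem.List.min?_eq_none_iff ([] : List Int) (fun x => x)).mpr rfl] at hmn
    simp at hmn
  obtain ⟨h, t, hu2⟩ := List.exists_cons_of_ne_nil hune
  rw [hu2] at hperm hlt ⊢
  -- head = mn
  have hmem_iff : ∀ y : Int, y ∈ h :: t ↔ y ∈ s := fun y => hperm.mem_iff
  have hh_eq : h = mn := by
    have hmn_mem : mn ∈ h :: t := (hmem_iff mn).mpr (PySem.List.min?_mem hmn)
    have hle : mn ≤ h := PySem.List.min?_isMin hmn h ((hmem_iff h).mp (by simp))
    rcases List.mem_cons.mp hmn_mem with h1 | h1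
    · omega
    · have := (List.pairwise_cons.mp hlt).1 mn h1; omega
  -- last = mx
  have hl_eq : (h :: t).getLast (by simp) = mx := by
    have h1 : mx ≤ (h :: t).getLast (by simp) :=
      pvLe_getLast _ (by simp) hlt mx ((hmem_iff mx).mpr (PySem.List.max?_mem hmx))
    have h2 : (h :: t).getLast (by simp) ≤ mx :=
      PySem.List.max?_isMax hmx _ ((hmem_iff _).mp (List.getLast_mem _))
    omega
  -- B side: foldl to flatMap, then the gap lemma
  rw [List.drop_one, List.tail_cons,
    PySem.List.foldl_append_eq_flatMap (fun pc : Int × Int => PySem.List.pyRange (pc.1 + 1) pc.2)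
      ((h :: t).zip t) [], List.nil_append,
    pvGaps_eq_filter t h hlt, hl_eq, hh_eq]
  -- A side: the set difference is an already-sorted sublist of the range
  have hnd : PySem.Set.ofList (PySem.List.pyRange mn (mx + 1)) = PySem.List.pyRange mn (mx + 1) :=
    PySem.Set.ofList_eq_self_of_nodup _ (PySem.List.nodup_pyRange_one mn (mx + 1))
  rw [show PySem.Set.diff (PySem.Set.ofList (PySem.List.pyRange mn (mx + 1))) s
      = (PySem.Set.ofList (PySem.List.pyRange mn (mx + 1))).filter (fun x => !(s.contains x))
      from rfl, hnd]
  rw [PySem.List.sorted_eq_self_of_pairwise _ _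
    (((PySem.List.pairwise_lt_pyRange_one mn (mx + 1)).filter _).imp (fun h => le_of_lt h))]
  apply List.filter_congr
  intro y _
  have h2 : y ∈ mn :: t ↔ y ∈ s := by rw [← hh_eq]; exact hmem_iff y
  simp only [PySem.Set.contains_eq_listContains, List.contains_eq_mem, h2]

-- the two loop bodies agree
lemma pvStep_eq : pvStepA = pvStepB := by
  funext warnings p
  obtain ⟨tag, groups⟩ := p
  unfold pvStepA pvStepB
  by_cases hlen : groups.length < 2
  · simp [hlen]
  · simp only [hlen, if_false]
    have hne : PySem.Set.ofList groups ≠ [] := by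
      rcases groups with _ | ⟨x, xs⟩
      · simp at hlen
      · rw [PySem.Set.ofList_cons]; exact List.cons_ne_nil _ _
    rcases hmn : PySem.List.min? (PySem.Set.ofList groups) (fun x => x) with _ | mn
    · exact absurd ((PySem.List.min?_eq_none_iff _ _).mp hmn) hne
    rcases hmx : PySem.List.max? (PySem.Set.ofList groups) (fun x => x) with _ | mx
    · exact absurd ((PySem.List.max?_eq_none_iff _ _).mp hmx) hne
    simp only
    rw [PySem.List.slice_from _ (by norm_num : (0:Int) ≤ 1)]
    simp only [Int.toNat_one]
    rw [pvMissing_eq groups mn mx hmn hmx]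

-- ===== VERDICT (by name: the statement is the Claim_ definition above) =====
theorem check_tag_discontinuity_py_spec : Claim_equal_check_tag_discontinuity_py := by
  intro tag_info _
  unfold Spec_check_tag_discontinuity_py check_tag_discontinuity_py check_tag_discontinuity_py_alt
  rw [pvStep_eq]
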